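-- pv_equiv track=rewrite | github.com/giorgiodidon/controller-forno | core/pid_analyzer.py | _segment_by_band
-- ===== SOURCE A (Python) =====
-- ANALYSIS_BANDS = [0, 200, 400, 600, 800, 1000, 1200]
--
-- def _segment_by_band(temperatures):
--     """
--     Segmenta campioni per fascia di temperatura.
--     Usa il setpoint per determinare la fascia (non la temp attuale).
--
--     Returns:
--         dict: {band_temp: [samples]}
--     """
--     band_data = {band: [] for band in ANALYSIS_BANDS}
--
--     for sample in temperatures:
--         setpoint = sample.get('setpoint', 0)
--         temp = sample.get('temp', 0)
--
--         # Trova fascia appropriata basata sul setpoint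
--         assigned_band = ANALYSIS_BANDS[0]
--         for band in ANALYSIS_BANDS:
--             if setpoint >= band:
--                 assigned_band = band
--
--         band_data[assigned_band].append(sample)
--
--     return band_data
-- ===== SOURCE B (Python) =====
-- ANALYSIS_BANDS = [0, 200, 400, 600, 800, 1000, 1200]
--
-- def _band_of(sample):
--     # bands are the multiples of 200 from 0 to 1200: closed-form bucket, clamped
--     return min(max(sample.get('setpoint', 0), 0) // 200, 6) * 200
--
-- def _segment_by_band(temperatures):
--     # one filter pass per band instead of appending into a mutated dict
--     return {band: [s for s in temperatures if _band_of(s) == band]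
--             for band in ANALYSIS_BANDS}
-- ===== Notes on version B (the rewrite author's own statement) =====
-- stated objective: alternative
-- what changed: B inverts the grouping: instead of A's single pass that appends each sample into a mutated dict after an inner linear scan over ANALYSIS_BANDS, B builds the dict per band with one filter comprehension per band, classifying each sample by the closed-form formula min(max(setpoint,0)//200,6)*200 (the bands are exactly the multiples of 200 from 0 to 1200).
import Mathlib
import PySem

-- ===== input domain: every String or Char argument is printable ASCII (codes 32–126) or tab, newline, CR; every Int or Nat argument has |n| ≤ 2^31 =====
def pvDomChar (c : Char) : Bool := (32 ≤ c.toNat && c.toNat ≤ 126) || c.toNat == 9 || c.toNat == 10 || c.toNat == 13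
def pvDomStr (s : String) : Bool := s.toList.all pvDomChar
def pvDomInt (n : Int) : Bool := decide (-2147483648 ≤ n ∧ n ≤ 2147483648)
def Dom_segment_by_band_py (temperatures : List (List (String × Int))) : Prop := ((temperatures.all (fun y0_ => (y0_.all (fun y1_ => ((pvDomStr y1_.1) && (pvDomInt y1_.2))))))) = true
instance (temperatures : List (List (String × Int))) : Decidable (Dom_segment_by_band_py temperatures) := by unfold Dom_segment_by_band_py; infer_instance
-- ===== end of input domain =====

-- B inverts the grouping: one filter pass per band with a closed-form band formula,
-- instead of A's single mutating-dict pass with an inner scan (objective: alternative).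

-- ===== PORT A =====
def pvBANDS : List Int := [0, 200, 400, 600, 800, 1000, 1200]

def segment_by_band_py (temperatures : List (List (String × Int))) : List (Int × List (List (String × Int))) :=
  -- band_data = {band: [] for band in ANALYSIS_BANDS}
  let init : PySem.Dict Int (List (List (String × Int))) :=
    pvBANDS.foldl (fun d band => d.insert band []) PySem.Dict.empty
  -- for sample in temperatures: …
  let final := temperatures.foldl (fun band_data sample =>
    let setpoint := (PySem.Dict.mk sample).getD "setpoint" 0
    let _temp := (PySem.Dict.mk sample).getD "temp" 0
    -- assigned_band = ANALYSIS_BANDS[0]; for band in ANALYSIS_BANDS: if setpoint >= band: assigned_band = band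
    let assigned_band := pvBANDS.foldl (fun ab band => if setpoint ≥ band then band else ab) (0 : Int)
    band_data.modify assigned_band [] (fun l => l ++ [sample])) init
  final.items

-- ===== PORT B =====
def pvBandOf (sample : List (String × Int)) : Int :=
  (min (PySem.Int.floordiv (max ((PySem.Dict.mk sample).getD "setpoint" 0) 0) 200) 6) * 200

def segment_by_band_py_alt (temperatures : List (List (String × Int))) : List (Int × List (List (String × Int))) :=
  pvBANDS.map (fun band => (band, temperatures.filter (fun s => pvBandOf s == band)))

-- ===== PRECONDITION & SPEC =====
def Spec_segment_by_band_py (temperatures : List (List (String × Int))) (out : List (Int × List (List (String × Int)))) : Prop := out = segment_by_band_py_alt temperatures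
instance (temperatures : List (List (String × Int))) (out : List (Int × List (List (String × Int)))) : Decidable (Spec_segment_by_band_py temperatures out) := by unfold Spec_segment_by_band_py; infer_instance

-- ===== CLAIM (what is proved, stated in full; the proofs are below) =====
def Claim_equal_segment_by_band_py : Prop := ∀ (temperatures : List (List (String × Int))), Dom_segment_by_band_py temperatures → Spec_segment_by_band_py temperatures (segment_by_band_py temperatures)

-- ===== LEMMAS AND PROOFS =====

-- A's inner scan computes exactly B's closed-form band.
theorem pv_band_eq (s : Int) :
    pvBANDS.foldl (fun ab band => if s ≥ band then band else ab) (0 : Int)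
      = (min (PySem.Int.floordiv (max s 0) 200) 6) * 200 := by
  have h200 : (0:Int) < 200 := by norm_num
  simp only [pvBANDS, List.foldl]
  rw [PySem.Int.floordiv_eq_ediv_of_pos h200]
  split_ifs <;> omega

theorem pv_bandOf_mem (sample : List (String × Int)) : pvBandOf sample ∈ pvBANDS := by
  have h200 : (0:Int) < 200 := by norm_num
  have := pv_band_eq ((PySem.Dict.mk sample).getD "setpoint" 0)
  simp only [pvBANDS, List.foldl] at this
  unfold pvBandOf
  rw [← this]
  simp only [pvBANDS, List.mem_cons]
  split_ifs <;> omega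

-- A's sample loop, with the key abstracted: getD after the fold.
theorem pv_getD_fold (temps : List (List (String × Int)))
    (key : List (String × Int) → Int)
    (d : PySem.Dict Int (List (List (String × Int)))) (b : Int) :
    (temps.foldl (fun band_data sample =>
        band_data.modify (key sample) [] (fun l => l ++ [sample])) d).getD b []
      = d.getD b [] ++ temps.filter (fun s => key s == b) := by
  induction temps generalizing d with
  | nil => simp
  | cons x xs ih =>
    simp only [List.foldl, List.filter]
    rw [ih]
    rw [PySem.Dict.getD_modify]
    by_cases h : key x = b
    · simp [h, List.append_assoc]
    · have : (key x == b) = false := by simp [h]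
      rw [if_neg (fun hb => h hb.symm), this]

theorem pv_keys_fold (temps : List (List (String × Int)))
    (key : List (String × Int) → Int)
    (hmem : ∀ s, key s ∈ pvBANDS)
    (d : PySem.Dict Int (List (List (String × Int))))
    (hkeys : d.keys = pvBANDS) :
    (temps.foldl (fun band_data sample =>
        band_data.modify (key sample) [] (fun l => l ++ [sample])) d).keys = pvBANDS := by
  rw [PySem.Dict.keys_foldl_modify_key, hkeys, PySem.Set.update_eq_append_filter]
  have : (PySem.Set.ofList (temps.map key)).filter (fun y => !(PySem.Set.contains pvBANDS y)) = [] := by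
    rw [List.filter_eq_nil_iff]
    intro a ha
    have : a ∈ temps.map key := (PySem.Set.mem_ofList _ _).mp ha
    obtain ⟨s, _, rfl⟩ := List.mem_map.mp this
    simp [PySem.Set.contains_eq_listContains, hmem s]
  rw [this, List.append_nil]

def pvInit : PySem.Dict Int (List (List (String × Int))) :=
  pvBANDS.foldl (fun d band => d.insert band []) PySem.Dict.empty

theorem pv_init_getD (b : Int) (hb : b ∈ pvBANDS) : pvInit.getD b [] = [] := by
  simp only [pvBANDS, List.mem_cons, List.not_mem_nil, or_false] at hb
  rcases hb with rfl | rfl | rfl | rfl | rfl | rfl | rfl <;> rfl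

-- Characterisation of A's result.
theorem pv_A_items (temps : List (List (String × Int))) :
    segment_by_band_py temps
      = pvBANDS.map (fun b => (b, temps.filter (fun s =>
          (pvBANDS.foldl (fun ab band => if (PySem.Dict.mk s).getD "setpoint" 0 ≥ band then band else ab) (0 : Int)) == b))) := by
  unfold segment_by_band_py
  set key : List (String × Int) → Int := fun s =>
    pvBANDS.foldl (fun ab band => if (PySem.Dict.mk s).getD "setpoint" 0 ≥ band then band else ab) (0 : Int) with hkey
  have hmem : ∀ s, key s ∈ pvBANDS := by
    intro s
    have := pv_bandOf_mem s
    unfold pvBandOf at this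
    rw [hkey]
    simpa [pv_band_eq] using this
  have hinitkeys : pvInit.keys = pvBANDS := by decide
  have hnd : pvBANDS.Nodup := by decide
  show (temps.foldl (fun band_data sample =>
      band_data.modify (key sample) [] (fun l => l ++ [sample])) pvInit).items = _
  set final := temps.foldl (fun band_data sample =>
      band_data.modify (key sample) [] (fun l => l ++ [sample])) pvInit with hfinal
  have hk : final.keys = pvBANDS := pv_keys_fold temps key hmem pvInit hinitkeys
  have hknd : final.keys.Nodup := by rw [hk]; exact hnd
  rw [PySem.Dict.items_eq_map_keys final hknd ([] : List (List (String × Int))), hk]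
  apply List.map_congr_left
  intro b hb
  rw [hfinal, pv_getD_fold, pv_init_getD b hb]
  rfl

-- ===== VERDICT (by name: the statement is the Claim_ definition above) =====
theorem segment_by_band_py_spec : Claim_equal_segment_by_band_py := by
  intro temps _
  unfold Spec_segment_by_band_py
  rw [pv_A_items]
  unfold segment_by_band_py_alt
  apply List.map_congr_left
  intro b _
  congr 1
  apply List.filter_congr
  intro s _
  simp [pvBandOf, pv_band_eq]
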